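-- pv_equiv track=rewrite | github.com/yingl/LintCodeInPython | smart-sale.py | minItem
-- ===== SOURCE A (Python) =====
-- def minItem(ids, m):
--     # write your code here
--     r = 0
--     di = {}
--     for i in ids:
--         if i not in di:
--             di[i] = 1
--             r += 1
--         else:
--             di[i] += 1
--     s = sorted(di.values())
--     for i in s:
--         if i > m:
--             return r
--         else:
--             m -= i
--             r -= 1
--     return r
-- ===== SOURCE B (Python) =====
-- def minItem(ids, m):
--     freq = {}
--     for i in ids:
--         freq[i] = freq.get(i, 0) + 1
--     r = len(freq)
--     if not freq:
--         return 0
--     cnt = {}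
--     for v in freq.values():
--         cnt[v] = cnt.get(v, 0) + 1
--     maxf = max(freq.values())
--     for f in range(1, maxf + 1):
--         c = cnt.get(f, 0)
--         k = max(0, min(c, m // f))
--         m -= k * f
--         r -= k
--         if k < c:
--             return r
--     return r
-- ===== Notes on version B (the rewrite author's own statement) =====
-- stated objective: alternative
-- what changed: B replaces A's comparison sort of the frequency list and its one-id-at-a-time removal loop by a counting-sort-style bucket table cnt[f] = number of ids with frequency f, removing whole buckets in one m // f batch step; it trades the sort for a bucket pass (asymptotically O(n + maxf) after counting vs O(n + d log d), not measurably faster on the benchmark's inputs).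
import Mathlib
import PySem

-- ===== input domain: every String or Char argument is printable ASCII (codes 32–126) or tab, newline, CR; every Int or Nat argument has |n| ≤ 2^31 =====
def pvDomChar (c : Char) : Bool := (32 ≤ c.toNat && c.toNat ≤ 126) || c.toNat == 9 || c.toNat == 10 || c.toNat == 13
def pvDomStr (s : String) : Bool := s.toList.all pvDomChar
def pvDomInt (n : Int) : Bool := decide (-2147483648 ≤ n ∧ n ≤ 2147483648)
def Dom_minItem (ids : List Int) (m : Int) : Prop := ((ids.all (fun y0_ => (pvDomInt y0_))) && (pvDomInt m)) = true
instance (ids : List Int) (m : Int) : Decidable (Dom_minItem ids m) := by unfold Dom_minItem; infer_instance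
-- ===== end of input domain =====

-- B replaces A's comparison sort of the frequency list by a counting-sort-style bucket
-- table with batch removal via integer division (objective: alternative algorithm, same cost in practice).

-- ===== PORT A =====
-- A's second for-loop over the sorted frequency list, with its early return
def minItemGo (s : List Int) (m r : Int) : Int :=
  match s with
  | [] => r
  | i :: t => if i > m then r else minItemGo t (m - i) (r - 1)

def minItem (ids : List Int) (m : Int) : Int :=
  -- r = 0; di = {}; for i in ids: if i not in di: di[i] = 1; r += 1 else: di[i] += 1
  let st := ids.foldl (fun (p : PySem.Dict Int Int × Int) i =>
      if p.1.contains i = false then (p.1.insert i 1, p.2 + 1)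
      else (p.1.modify i 0 (· + 1), p.2))
    (PySem.Dict.empty, 0)
  -- s = sorted(di.values()); greedy loop
  minItemGo (PySem.List.sorted st.1.values (fun x => x) false) m st.2

-- ===== PORT B =====
-- B's 'for f in range(1, maxf + 1)' loop; n = number of remaining values of f
def minItemAltGo (n : Nat) (f : Int) (cnt : PySem.Dict Int Int) (m r : Int) : Int :=
  match n with
  | 0 => r
  | n' + 1 =>
    let c := cnt.getD f 0
    let k := max 0 (min c (PySem.Int.floordiv m f))
    if k < c then r - k
    else minItemAltGo n' (f + 1) cnt (m - k * f) (r - k)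

def minItem_alt (ids : List Int) (m : Int) : Int :=
  -- freq = {}; for i in ids: freq[i] = freq.get(i, 0) + 1
  let freq := ids.foldl (fun d i => d.insert i (d.getD i 0 + 1)) PySem.Dict.empty
  let r : Int := freq.size
  -- cnt = {}; for v in freq.values(): cnt[v] = cnt.get(v, 0) + 1
  let cnt := freq.values.foldl (fun d v => d.insert v (d.getD v 0 + 1)) PySem.Dict.empty
  -- 'if not freq: return 0' is the none branch (freq is empty iff it has no values)
  match PySem.List.max? freq.values (fun x => x) with
  | none => 0
  | some maxf => minItemAltGo maxf.toNat 1 cnt m r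

-- ===== PRECONDITION & SPEC =====
def Spec_minItem (ids : List Int) (m : Int) (out : Int) : Prop := out = minItem_alt ids m
instance (ids : List Int) (m : Int) (out : Int) : Decidable (Spec_minItem ids m out) := by unfold Spec_minItem; infer_instance

-- ===== CLAIM (what is proved, stated in full; the proofs are below) =====
def Claim_equal_minItem : Prop := ∀ (ids : List Int) (m : Int), Dom_minItem ids m → Spec_minItem ids m (minItem ids m)

-- ===== LEMMAS AND PROOFS =====

-- A's dict/counter loop equals B's (modify k 0 (·+1) IS insert k (getD k 0 + 1)),
-- and A's running r equals the dict's size.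
lemma foldA_eq (l : List Int) (d : PySem.Dict Int Int) (r : Int)
    (hnd : d.keys.Nodup) (hr : r = (d.size : Int)) :
    l.foldl (fun (p : PySem.Dict Int Int × Int) i =>
        if p.1.contains i = false then (p.1.insert i 1, p.2 + 1)
        else (p.1.modify i 0 (· + 1), p.2)) (d, r)
      = (l.foldl (fun d i => d.insert i (d.getD i 0 + 1)) d,
         ((l.foldl (fun d i => d.insert i (d.getD i 0 + 1)) d).size : Int)) := by
  induction l generalizing d r with
  | nil => simp [hr]
  | cons i t ih =>
    simp only [List.foldl_cons]
    by_cases h : d.contains i = true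
    · rw [if_neg (by simp [h])]
      have hmod : d.modify i 0 (· + 1) = d.insert i (d.getD i 0 + 1) := rfl
      rw [hmod]
      exact ih _ r (PySem.Dict.nodup_keys_insert d i _ hnd)
        (by rw [hr, PySem.Dict.size_insert]; simp [h])
    · have h' : d.contains i = false := by simpa using h
      rw [if_pos (by simp [h'])]
      have hins : d.insert i 1 = d.insert i (d.getD i 0 + 1) := by
        rw [PySem.Dict.getD_of_not_contains d 0 h']; norm_num
      rw [hins]
      exact ih _ (r + 1) (PySem.Dict.nodup_keys_insert d i _ hnd)
        (by rw [hr, PySem.Dict.size_insert, if_neg (by simp [h'])]; push_cast; ring)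

-- the sorted frequency list, bucket by bucket: counts of f, f+1, …, f+n-1
def bucketList (vals : List Int) : Nat → Int → List Int
  | 0, _ => []
  | n + 1, f => List.replicate (vals.count f) f ++ bucketList vals n (f + 1)

lemma bucketList_congr (vals vals' : List Int) (n : Nat) :
    ∀ f : Int, (∀ g, f ≤ g → vals.count g = vals'.count g) →
    bucketList vals n f = bucketList vals' n f := by
  induction n with
  | zero => intro f _; rfl
  | succ n ih =>
    intro f h
    simp only [bucketList]
    rw [h f le_rfl, ih (f + 1) (fun g hg => h g (by omega))]

lemma mem_bucketList (vals : List Int) (n : Nat) :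
    ∀ (f x : Int), x ∈ bucketList vals n f → f ≤ x := by
  induction n with
  | zero => intro f x hx; simp [bucketList] at hx
  | succ n ih =>
    intro f x hx
    simp only [bucketList, List.mem_append, List.mem_replicate] at hx
    rcases hx with ⟨_, rfl⟩ | hx
    · exact le_rfl
    · have := ih (f + 1) x hx; omega

lemma bucketList_perm (n : Nat) : ∀ (vals : List Int) (f : Int),
    (∀ v ∈ vals, f ≤ v ∧ v < f + n) → (bucketList vals n f).Perm vals := by
  induction n with
  | zero =>
    intro vals f h
    have : vals = [] := List.eq_nil_iff_forall_not_mem.2 (fun v hv => by have := h v hv; simp at this; omega)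
    simp [bucketList, this]
  | succ n ih =>
    intro vals f h
    have hfilter : vals.filter (fun v => v == f) = List.replicate (vals.count f) f :=
      List.filter_beq f
    have hcongr : bucketList vals n (f + 1) = bucketList (vals.filter (fun v => !(v == f))) n (f + 1) :=
      bucketList_congr _ _ n (f + 1) (fun g hg => by
        rw [List.count_filter (by simp; omega)])
    have hrest : (bucketList (vals.filter (fun v => !(v == f))) n (f + 1)).Perm
        (vals.filter (fun v => !(v == f))) := by
      refine ih _ (f + 1) (fun v hv => ?_)
      have hv' := List.mem_filter.1 hv
      have hb : v ≠ f := by simpa using hv'.2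
      have := h v hv'.1
      push_cast at this ⊢
      omega
    have heq : bucketList vals (n + 1) f
        = vals.filter (fun v => v == f) ++ bucketList (vals.filter (fun v => !(v == f))) n (f + 1) := by
      simp only [bucketList]; rw [hfilter, hcongr]
    rw [heq]
    exact (List.Perm.append_left _ hrest).trans (List.filter_append_perm _ vals)

lemma bucketList_pairwise (vals : List Int) (n : Nat) :
    ∀ f : Int, (bucketList vals n f).Pairwise (· ≤ ·) := by
  induction n with
  | zero => intro f; simp [bucketList]
  | succ n ih =>
    intro f
    simp only [bucketList]
    refine List.pairwise_append.2 ⟨List.pairwise_replicate.2 (Or.inr le_rfl), ih (f + 1), ?_⟩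
    intro x hx y hy
    have hx' : x = f := (List.mem_replicate.1 hx).2
    have hy' : f + 1 ≤ y := mem_bucketList vals n (f + 1) y hy
    omega

-- A's greedy loop eats a whole bucket of c copies of f in one floordiv batch
lemma greedy_replicate (c : Nat) (f : Int) (hf : 1 ≤ f) :
    ∀ (rest : List Int) (m r : Int),
    minItemGo (List.replicate c f ++ rest) m r
      = if max 0 (min (c : Int) (PySem.Int.floordiv m f)) < (c : Int) then
          r - max 0 (min (c : Int) (PySem.Int.floordiv m f))
        else minItemGo rest (m - max 0 (min (c : Int) (PySem.Int.floordiv m f)) * f)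
          (r - max 0 (min (c : Int) (PySem.Int.floordiv m f))) := by
  induction c with
  | zero =>
    intro rest m r
    have hk : max 0 (min ((0 : Nat) : Int) (PySem.Int.floordiv m f)) = 0 := by omega
    rw [hk]
    simp
  | succ c ih =>
    intro rest m r
    rw [PySem.Int.floordiv_eq_ediv_of_pos (by omega)]
    have hq := Int.emod_nonneg m (show f ≠ 0 by omega)
    by_cases hm : f > m
    · -- first element already unaffordable: q ≤ 0, k = 0, early return with r
      have hq0 : m / f ≤ 0 := by
        calc m / f ≤ (f - 1) / f := Int.ediv_le_ediv (by omega) (by omega)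
          _ = 0 := Int.ediv_eq_zero_of_lt (by omega) (by omega)
      have hk : max 0 (min ((c + 1 : Nat) : Int) (m / f)) = 0 := by push_cast; omega
      rw [hk]
      rw [if_pos (by push_cast; omega)]
      simp only [List.replicate_succ, List.cons_append, minItemGo]
      rw [if_pos hm]
      ring
    · -- f ≤ m: remove one copy, shift the quotient by one, use the IH
      have h1q : 1 ≤ m / f := Int.le_ediv_iff_mul_le (by omega) |>.2 (by omega)
      have hstep : (m - f) / f = m / f - 1 := by
        have := Int.add_mul_ediv_right m (-1) (show f ≠ 0 by omega)
        simpa [sub_eq_add_neg, neg_mul] using this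
      simp only [List.replicate_succ, List.cons_append, minItemGo]
      rw [if_neg (by omega)]
      rw [ih rest (m - f) (r - 1)]
      rw [PySem.Int.floordiv_eq_ediv_of_pos (by omega), hstep]
      set q := m / f with hqdef
      have hk : max 0 (min ((c + 1 : Nat) : Int) q) = max 0 (min (c : Int) (q - 1)) + 1 := by
        push_cast; omega
      rw [hk]
      set k' := max 0 (min (c : Int) (q - 1)) with hk'def
      by_cases hlt : k' < (c : Int)
      · rw [if_pos hlt, if_pos (by push_cast; omega)]
        ring
      · rw [if_neg hlt, if_neg (by push_cast; omega)]
        have harg : m - f - k' * f = m - (k' + 1) * f := by ring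
        have harg2 : r - 1 - k' = r - (k' + 1) := by ring
        rw [harg, harg2]

-- A's greedy loop over the bucket decomposition IS B's bucket loop
lemma go_eq (vals : List Int) (cnt : PySem.Dict Int Int)
    (hcnt : ∀ g : Int, cnt.getD g 0 = (vals.count g : Int)) (n : Nat) :
    ∀ (f m r : Int), 1 ≤ f →
    minItemGo (bucketList vals n f) m r = minItemAltGo n f cnt m r := by
  induction n with
  | zero => intro f m r _; simp [bucketList, minItemGo, minItemAltGo]
  | succ n ih =>
    intro f m r hf
    simp only [bucketList, minItemAltGo, hcnt f]
    rw [greedy_replicate (vals.count f) f hf]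
    by_cases hlt : max 0 (min ((vals.count f : Nat) : Int) (PySem.Int.floordiv m f)) < ((vals.count f : Nat) : Int)
    · rw [if_pos hlt, if_pos hlt]
    · rw [if_neg hlt, if_neg hlt]
      exact ih (f + 1) _ _ (by omega)

-- every value of Counter(ids) is a positive count
lemma counter_values_pos (ids : List Int) :
    ∀ v ∈ (PySem.Dict.counter ids).values, 1 ≤ v := by
  intro v hv
  rw [PySem.Dict.values_eq_map_keys _ (PySem.Dict.nodup_keys_counter ids) 0] at hv
  obtain ⟨k, hk, rfl⟩ := List.mem_map.1 hv
  rw [PySem.Dict.getD_counter]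
  have hmem : k ∈ ids := by
    rw [PySem.Dict.keys_counter] at hk
    exact (PySem.Set.mem_ofList ids k).1 hk
  have := List.count_pos_iff.2 hmem
  omega

-- ===== VERDICT (by name: the statement is the Claim_ definition above) =====
theorem minItem_spec : Claim_equal_minItem := by
  unfold Claim_equal_minItem Spec_minItem
  intro ids m _
  unfold minItem minItem_alt
  rw [foldA_eq ids PySem.Dict.empty 0 PySem.Dict.nodup_keys_empty (by simp [PySem.Dict.size_empty])]
  simp only [PySem.Dict.foldl_insert_getD_add_one_eq_counter]
  set F := PySem.Dict.counter ids with hF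
  cases hmax : PySem.List.max? F.values (fun x => x) with
  | none =>
    have hnil : F.values = [] := (PySem.List.max?_eq_none_iff _ _).1 hmax
    have hsz : F.size = 0 := by
      have : F.values.length = 0 := by rw [hnil]; rfl
      simpa [PySem.Dict.values, PySem.Dict.size] using this
    rw [(PySem.List.sorted_eq_nil_iff _ _ _).2 hnil]
    simp [minItemGo, hsz]
  | some M =>
    have hpos := counter_values_pos ids
    have hM1 : (1 : Int) ≤ M := hpos M (PySem.List.max?_mem hmax)
    have hMnat : ((M.toNat : Nat) : Int) = M := Int.toNat_of_nonneg (by omega)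
    have hbounds : ∀ v ∈ F.values, 1 ≤ v ∧ v < 1 + (M.toNat : Int) := by
      intro v hv
      have h1 := hpos v hv
      have h2 : v ≤ M := PySem.List.max?_isMax hmax v hv
      omega
    have hsorted : PySem.List.sorted F.values (fun x => x) false = bucketList F.values M.toNat 1 :=
      PySem.List.sorted_id_eq_of_perm_of_pairwise _ _
        (bucketList_perm M.toNat F.values 1 (by simpa using hbounds))
        (bucketList_pairwise F.values M.toNat 1)
    rw [hsorted]
    exact go_eq F.values (PySem.Dict.counter F.values)
      (fun g => PySem.Dict.getD_counter F.values g) M.toNat 1 m _ le_rfl
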